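-- pv_equiv track=rewrite | github.com/GCrispino/advent-of-code-2020 | days/6b.py | get_questions_answered_by_all
-- ===== SOURCE A (Python) =====
-- def get_questions_answered_by_all(group):
--     entries = {}
--     lines = group.split('\n')
--     n_lines = len(lines)
--     for line in lines:
--         for c in line:
--             if c not in entries:
--                 entries[c] = 1
--             else:
--                 entries[c] += 1
--     all_answered = [k for k, v in entries.items() if v == n_lines]
--     return all_answered
-- ===== SOURCE B (Python) =====
-- def get_questions_answered_by_all(group):
--     # sort-then-run-length-scan counting instead of a frequency dictionary
--     n_lines = group.count('\n') + 1
--     winners = set()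
--     prev = None
--     run = 0
--     for c in sorted(ch for ch in group if ch != '\n'):
--         if c == prev:
--             run += 1
--         else:
--             if run == n_lines:
--                 winners.add(prev)
--             prev = c
--             run = 1
--     if run == n_lines:
--         winners.add(prev)
--     out = []
--     for c in group:
--         if c in winners and c not in out:
--             out.append(c)
--     return out
-- ===== Notes on version B (the rewrite author's own statement) =====
-- stated objective: alternative
-- what changed: Counting is done by sorting the non-newline characters and run-length-scanning the sorted list for runs of exactly n_lines (= newline count + 1), instead of A's per-character frequency dictionary; first-appearance output order is recovered by a final dedup pass over the string.
import Mathlib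
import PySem

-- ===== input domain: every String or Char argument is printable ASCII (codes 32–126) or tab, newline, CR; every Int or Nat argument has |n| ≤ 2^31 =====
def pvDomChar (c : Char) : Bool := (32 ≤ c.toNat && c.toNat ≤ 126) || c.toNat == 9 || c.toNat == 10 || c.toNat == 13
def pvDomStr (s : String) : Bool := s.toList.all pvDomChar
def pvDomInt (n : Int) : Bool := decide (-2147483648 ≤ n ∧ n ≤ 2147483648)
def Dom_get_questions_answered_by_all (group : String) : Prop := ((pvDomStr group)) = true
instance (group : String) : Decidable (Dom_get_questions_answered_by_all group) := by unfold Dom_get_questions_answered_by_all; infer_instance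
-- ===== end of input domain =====

-- B replaces A's per-line frequency dictionary by sorting the non-newline characters and
-- detecting, in one run-length scan over the sorted list, which characters occur exactly
-- n_lines times; the output order is recovered by a final first-appearance pass (objective: alternative).

-- ===== PORT A =====
def get_questions_answered_by_all (group : String) : List String :=
  let lines : List (List Char) := PySem.Chars.splitOn group.toList ['\n']
  let n_lines : Int := (lines.length : Int)
  let entries : PySem.Dict Char Int :=
    lines.foldl (fun entries line =>
      line.foldl (fun entries c =>
        if entries.contains c = false then entries.insert c 1
        else entries.insert c (entries.getD c 0 + 1)) entries) PySem.Dict.empty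
  (entries.items.filter (fun kv => kv.2 == n_lines)).map (fun kv => String.singleton kv.1)

-- ===== PORT B =====
-- loop body of B's run-length scan over the sorted characters: state (winners, prev, run)
def pvStepB (n_lines : Int) (st : PySem.Set Char × Option Char × Int) (c : Char) :
    PySem.Set Char × Option Char × Int :=
  if some c == st.2.1 then (st.1, st.2.1, st.2.2 + 1)
  else
    ((if st.2.2 == n_lines then
        (match st.2.1 with
         | some p => PySem.Set.add st.1 p
         | none => st.1)   -- unreachable in B: run = 0 only with prev = None, and n_lines ≥ 1
      else st.1), some c, 1)

-- the trailing 'if run == n_lines: winners.add(prev)' after B's loop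
def pvFlushB (n_lines : Int) (st : PySem.Set Char × Option Char × Int) : PySem.Set Char :=
  if st.2.2 == n_lines then
    (match st.2.1 with
     | some p => PySem.Set.add st.1 p
     | none => st.1)
  else st.1

def get_questions_answered_by_all_alt (group : String) : List String :=
  let n_lines : Int := (PySem.Str.count group "\n" : Int) + 1
  let winners : PySem.Set Char :=
    pvFlushB n_lines
      ((PySem.List.sorted (group.toList.filter (fun ch => ch != '\n')) (fun c => c) false).foldl
        (pvStepB n_lines) (PySem.Set.empty, none, 0))
  (group.toList.foldl
    (fun out c => if PySem.Set.contains winners c && !(out.contains c) then out ++ [c] else out)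
    []).map String.singleton

-- ===== PRECONDITION & SPEC =====
def Spec_get_questions_answered_by_all (group : String) (out : List String) : Prop := out = get_questions_answered_by_all_alt group
instance (group : String) (out : List String) : Decidable (Spec_get_questions_answered_by_all group out) := by unfold Spec_get_questions_answered_by_all; infer_instance

-- ===== CLAIM (what is proved, stated in full; the proofs are below) =====
def Claim_equal_get_questions_answered_by_all : Prop := ∀ (group : String), Dom_get_questions_answered_by_all group → Spec_get_questions_answered_by_all group (get_questions_answered_by_all group)

-- ===== LEMMAS AND PROOFS =====

-- structural model of s.split(sep) for a single-character separator
def pvSplit1 (sep : Char) (pre : List Char) : List Char → List (List Char)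
  | [] => [pre]
  | c :: rest => if c = sep then pre :: pvSplit1 sep [] rest else pvSplit1 sep (pre ++ [c]) rest

theorem pvSplitOn_go_eq (sep : Char) : ∀ (l : List Char) (fuel : Nat) (cur : List Char) (acc : List (List Char)),
    l.length < fuel →
    PySem.Chars.splitOn.go [sep] fuel l cur acc = acc.reverse ++ pvSplit1 sep cur.reverse l := by
  intro l
  induction l with
  | nil =>
    intro fuel cur acc h
    match fuel, h with
    | fuel+1, _ => simp [PySem.Chars.splitOn.go, pvSplit1]
  | cons c rest ih =>
    intro fuel cur acc h
    match fuel, h with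
    | fuel+1, h =>
      simp only [PySem.Chars.splitOn.go]
      by_cases hc : c = sep
      · simp [List.isPrefixOf, hc, ih fuel [] _ (by simpa using h), pvSplit1]
      · simp [List.isPrefixOf, Ne.symm hc, hc, ih fuel (c :: cur) acc (by simpa using h), pvSplit1]

theorem pvSplitOn_single (sep : Char) (s : List Char) :
    PySem.Chars.splitOn s [sep] = pvSplit1 sep [] s := by
  rw [PySem.Chars.splitOn.eq_def]
  simpa using pvSplitOn_go_eq sep s (s.length + 1) [] [] (by omega)

theorem pvSplit1_flatten (sep : Char) : ∀ (l pre : List Char),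
    (pvSplit1 sep pre l).flatten = pre ++ l.filter (fun c => c != sep) := by
  intro l
  induction l with
  | nil => simp [pvSplit1]
  | cons c rest ih =>
    intro pre
    by_cases hc : c = sep
    · simp [pvSplit1, hc, ih]
    · simp [pvSplit1, hc, ih, bne]

theorem pvSplit1_length (sep : Char) : ∀ (l pre : List Char),
    (pvSplit1 sep pre l).length = l.count sep + 1 := by
  intro l
  induction l with
  | nil => simp [pvSplit1]
  | cons c rest ih =>
    intro pre
    by_cases hc : c = sep
    · simp [pvSplit1, hc, ih]
    · simp [pvSplit1, hc, ih]

theorem pvCount_go_single (c : Char) : ∀ (l : List Char) (fuel : Nat) (acc : Nat),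
    l.length ≤ fuel →
    PySem.Chars.count.go [c] fuel l acc = acc + l.count c := by
  intro l
  induction l with
  | nil =>
    intro fuel acc h
    match fuel with
    | 0 => simp [PySem.Chars.count.go]
    | fuel+1 => simp [PySem.Chars.count.go]
  | cons d rest ih =>
    intro fuel acc h
    match fuel, h with
    | fuel+1, h =>
      simp only [PySem.Chars.count.go]
      by_cases hc : d = c
      · simp [List.isPrefixOf, hc, ih fuel (acc + 1) (by simpa using h)]
        omega
      · simp [List.isPrefixOf, hc, ih fuel acc (by simpa using h), Ne.symm hc]

theorem pvCount_single (s : List Char) (c : Char) :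
    PySem.Chars.count s [c] = s.count c := by
  simp [PySem.Chars.count]
  simpa using pvCount_go_single c s s.length 0 (le_refl _)

-- discard commutes with filter (both are filters)
theorem pvDiscard_filter (s : PySem.Set Char) (p : Char → Bool) (x : Char) :
    PySem.Set.discard (s.filter p) x = (PySem.Set.discard s x).filter p := by
  simp [PySem.Set.discard, List.filter_filter, Bool.and_comm]

-- set(filter) = filter(set): dedup-by-first-occurrence commutes with filter
theorem pvOfList_filter (l : List Char) (p : Char → Bool) :
    PySem.Set.ofList (l.filter p) = (PySem.Set.ofList l).filter p := by
  induction l with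
  | nil => simp [PySem.Set.ofList]
  | cons c rest ih =>
    by_cases hc : p c
    · simp [hc, PySem.Set.ofList_cons, ih, pvDiscard_filter]
    · simp [hc, PySem.Set.ofList_cons, ih, PySem.Set.discard, List.filter_filter]
      apply List.filter_congr
      intro a _
      by_cases hp : p a
      · have hac : a ≠ c := fun h => hc (h ▸ hp)
        simp [hp, hac]
      · simp [hp]

-- membership in B's run-length scan, from a mid-scan state (winners w, prev p, run r)
theorem pvScan_mem (n : Int) :
    ∀ (l : List Char) (w : PySem.Set Char) (p : Char) (r : Int),
    l.Pairwise (· ≤ ·) → (∀ y ∈ l, p ≤ y) →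
    ∀ x, x ∈ pvFlushB n (l.foldl (pvStepB n) (w, some p, r)) ↔
      (x ∈ w ∨ (x = p ∧ r + (l.count p : Int) = n) ∨ (x ∈ l ∧ x ≠ p ∧ (l.count x : Int) = n)) := by
  intro l
  induction l with
  | nil =>
    intro w p r _ _ x
    by_cases hr : r = n
    · simp [pvFlushB, hr, PySem.Set.mem_add]
    · simp [pvFlushB, hr]
  | cons c rest ih =>
    intro w p r hpair hge x
    have hc_le : p ≤ c := hge c (by simp)
    have hrest_ge : ∀ y ∈ rest, c ≤ y := fun y hy => (List.pairwise_cons.mp hpair).1 y hy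
    have hrest_pair : rest.Pairwise (· ≤ ·) := (List.pairwise_cons.mp hpair).2
    by_cases hcp : c = p
    · subst hcp
      have : pvStepB n (w, some c, r) c = (w, some c, r + 1) := by simp [pvStepB]
      rw [List.foldl_cons, this, ih w c (r + 1) hrest_pair hrest_ge x]
      constructor
      · rintro (h | ⟨hx, hcnt⟩ | ⟨hmem, hne, hcnt⟩)
        · exact Or.inl h
        · refine Or.inr (Or.inl ⟨hx, ?_⟩); simp; omega
        · exact Or.inr (Or.inr ⟨by simp [hmem], hne, by simpa [List.count_cons, Ne.symm hne] using hcnt⟩)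
      · rintro (h | ⟨hx, hcnt⟩ | ⟨hmem, hne, hcnt⟩)
        · exact Or.inl h
        · refine Or.inr (Or.inl ⟨hx, ?_⟩)
          simp at hcnt; omega
        · have hmem' : x ∈ rest := by
            rcases List.mem_cons.mp hmem with h | h
            · exact absurd h hne
            · exact h
          exact Or.inr (Or.inr ⟨hmem', hne, by simpa [List.count_cons, Ne.symm hne] using hcnt⟩)
    · -- new run starts at c; p < c ≤ every later element, so p does not occur in c :: rest
      have hplt : p < c := lt_of_le_of_ne hc_le (fun h => hcp h.symm)
      have hpnot : p ∉ c :: rest := by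
        intro h
        rcases List.mem_cons.mp h with h | h
        · exact hcp h.symm
        · exact absurd (hrest_ge p h) (not_le.mpr hplt)
      have hstep : pvStepB n (w, some p, r) c =
          ((if r == n then PySem.Set.add w p else w), some c, 1) := by
        simp only [pvStepB]
        have : (some c == some p) = false := by simp [hcp]
        simp [this]
      rw [List.foldl_cons, hstep, ih _ c 1 hrest_pair hrest_ge x]
      have hwmem : x ∈ (if r == n then PySem.Set.add w p else w) ↔ (x ∈ w ∨ (x = p ∧ r = n)) := by
        by_cases hr : r = n
        · simp [hr, PySem.Set.mem_add]
        · simp [hr]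
      have hcount_p : (c :: rest).count p = 0 := List.count_eq_zero.mpr hpnot
      rw [hwmem]
      constructor
      · rintro (⟨h | ⟨hx, hr⟩⟩ | ⟨hx, hcnt⟩ | ⟨hmem, hne, hcnt⟩)
        · exact Or.inl h
        · exact Or.inr (Or.inl ⟨hx, by simp [hcount_p, hr]⟩)
        · subst hx
          refine Or.inr (Or.inr ⟨by simp, hcp, ?_⟩)
          simp; omega
        · have hxp : x ≠ p := by
            intro h; subst h; exact absurd hmem (fun hm => hpnot (List.mem_cons_of_mem c hm))
          have hxc : (c :: rest).count x = rest.count x := by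
            simp [Ne.symm hne]
          exact Or.inr (Or.inr ⟨List.mem_cons_of_mem c hmem, hxp, by rw [hxc]; exact hcnt⟩)
      · rintro (h | ⟨hx, hcnt⟩ | ⟨hmem, hne, hcnt⟩)
        · exact Or.inl (Or.inl h)
        · subst hx
          rw [hcount_p] at hcnt
          exact Or.inl (Or.inr ⟨rfl, by omega⟩)
        · rcases List.mem_cons.mp hmem with hx | hx
          · subst hx
            refine Or.inr (Or.inl ⟨rfl, ?_⟩)
            simp at hcnt; omega
          · by_cases hxc : x = c
            · subst hxc
              refine Or.inr (Or.inl ⟨rfl, ?_⟩)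
              simp at hcnt; omega
            · refine Or.inr (Or.inr ⟨hx, hxc, ?_⟩)
              simpa [List.count_cons, Ne.symm hxc] using hcnt

-- B's winners set contains exactly the characters occurring n times in the scanned list
theorem pvWinners_mem (n : Int) (hn : 1 ≤ n) (l : List Char) (hpair : l.Pairwise (· ≤ ·)) :
    ∀ x, x ∈ pvFlushB n (l.foldl (pvStepB n) (PySem.Set.empty, none, 0)) ↔
      (x ∈ l ∧ (l.count x : Int) = n) := by
  intro x
  cases l with
  | nil =>
    have : (0 : Int) ≠ n := by omega
    simp [pvFlushB, PySem.Set.empty, this]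
  | cons c rest =>
    have hstep : pvStepB n (PySem.Set.empty, none, (0 : Int)) c = (PySem.Set.empty, some c, 1) := by
      have : (0 : Int) ≠ n := by omega
      simp [pvStepB, this]
    have hrest_ge : ∀ y ∈ rest, c ≤ y := fun y hy => (List.pairwise_cons.mp hpair).1 y hy
    rw [List.foldl_cons, hstep,
      pvScan_mem n rest PySem.Set.empty c 1 (List.pairwise_cons.mp hpair).2 hrest_ge x]
    constructor
    · rintro (h | ⟨hx, hcnt⟩ | ⟨hmem, hne, hcnt⟩)
      · simp [PySem.Set.empty] at h
      · subst hx; exact ⟨by simp, by simp; omega⟩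
      · exact ⟨List.mem_cons_of_mem c hmem, by simpa [List.count_cons, Ne.symm hne] using hcnt⟩
    · rintro ⟨hmem, hcnt⟩
      by_cases hxc : x = c
      · subst hxc
        refine Or.inr (Or.inl ⟨rfl, ?_⟩)
        simp at hcnt; omega
      · have hx : x ∈ rest := by
          rcases List.mem_cons.mp hmem with h | h
          · exact absurd h hxc
          · exact h
        exact Or.inr (Or.inr ⟨hx, hxc, by simpa [List.count_cons, Ne.symm hxc] using hcnt⟩)

-- ===== VERDICT (by name: the statement is the Claim_ definition above) =====
theorem get_questions_answered_by_all_spec : Claim_equal_get_questions_answered_by_all := by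
  intro group _
  unfold Spec_get_questions_answered_by_all
  unfold get_questions_answered_by_all get_questions_answered_by_all_alt
  simp only [pvSplitOn_single]
  -- A's nested dict-building loop is the counter of the concatenated lines
  have hstep : (fun (d : PySem.Dict Char Int) (c : Char) =>
      if d.contains c = false then d.insert c 1 else d.insert c (d.getD c 0 + 1))
      = fun d c => d.insert c (d.getD c 0 + 1) := by
    funext d c
    by_cases h : d.contains c = true
    · simp [h]
    · have h' : d.contains c = false := by simpa using h
      simp [h', PySem.Dict.getD_of_not_contains d 0 h']
  rw [← List.foldl_flatten, hstep, pvSplit1_flatten,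
    List.nil_append, PySem.Dict.foldl_insert_getD_add_one_eq_counter,
    PySem.Dict.items_counter, List.filter_map]
  -- abbreviations
  set F : List Char := group.toList.filter (fun ch => ch != '\n') with hF
  set n : Int := (PySem.Str.count group "\n" : Int) + 1 with hn
  have hnl : "\n".toList = ['\n'] := rfl
  have hnum : ((pvSplit1 '\n' [] group.toList).length : Int) = n := by
    simp [hn, pvSplit1_length, PySem.Str.count_eq, hnl, pvCount_single]
  have hn1 : 1 ≤ n := by
    rw [hn]; have : (0:Int) ≤ (PySem.Str.count group "\n" : Int) := Int.natCast_nonneg _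
    omega
  -- B's winners
  set winners : PySem.Set Char :=
    pvFlushB n ((PySem.List.sorted F (fun c => c) false).foldl (pvStepB n) (PySem.Set.empty, none, 0)) with hw
  have hperm : (PySem.List.sorted F (fun c => c) false).Perm F := PySem.List.sorted_perm F _ false
  have hwin : ∀ x, x ∈ winners ↔ (x ∈ F ∧ (F.count x : Int) = n) := by
    intro x
    rw [hw, pvWinners_mem n hn1 _ (by simpa using PySem.List.sorted_pairwise F (fun c => c))]
    rw [hperm.mem_iff, hperm.count_eq]
  -- B's output loop is set(filter(winners.contains, group))
  have hloop : (group.toList.foldl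
      (fun out c => if PySem.Set.contains winners c && !(out.contains c) then out ++ [c] else out) [])
      = PySem.Set.ofList (group.toList.filter (fun c => PySem.Set.contains winners c)) := by
    have hbody : (fun (out : List Char) (c : Char) =>
        if PySem.Set.contains winners c && !(out.contains c) then out ++ [c] else out)
        = fun out c => if PySem.Set.contains winners c then PySem.Set.add out c else out := by
      funext out c
      by_cases h2 : c ∈ out
      · simp [PySem.Set.add, h2]
      · simp [PySem.Set.add, h2]
    rw [hbody, ← List.foldl_filter, PySem.Set.ofList_eq_foldl]
  rw [hloop]
  have hA : PySem.Set.ofList F = List.filter (fun ch => ch != '\n') (PySem.Set.ofList group.toList) := by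
    rw [hF, pvOfList_filter]
  have hB : PySem.Set.ofList (List.filter (fun c => winners.contains c) group.toList)
      = List.filter (fun c => winners.contains c) (PySem.Set.ofList group.toList) :=
    pvOfList_filter _ _
  have hmapf : ((fun kv : Char × Int => String.singleton kv.1) ∘ (fun k => (k, (F.count k : Int))))
      = String.singleton := by funext k; rfl
  rw [hnum]
  rw [hB]
  rw [List.map_map]
  rw [hmapf]
  rw [hA]
  rw [List.filter_filter]
  congr 1
  apply List.filter_congr
  intro c hc
  have hcg : c ∈ group.toList := (PySem.Set.mem_ofList group.toList c).mp hc
  by_cases hcw : c ∈ winners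
  · obtain ⟨hcF, hcnt⟩ := (hwin c).mp hcw
    have hne : (c != '\n') = true := (List.mem_filter.mp hcF).2
    simp [hcw, hcnt, hne]
  · have hrhs : winners.contains c = false := by simpa using hcw
    rw [hrhs]
    by_cases h2 : (c != '\n') = true
    · by_cases h1 : (F.count c : Int) = n
      · exact absurd ((hwin c).mpr ⟨List.mem_filter.mpr ⟨hcg, h2⟩, h1⟩) hcw
      · simp [Function.comp, h1]
    · simp [Function.comp, show (c != '\n') = false by simpa using h2]
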